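-- pv_equiv track=rewrite | github.com/LBS-UFMG/propedia26 | public/data/protparam.py | calc_atomic_composition
-- ===== SOURCE A (Python) =====
-- from collections import Counter
--
-- def calc_atomic_composition(seq):
--     # Fórmulas de resíduos livres (aproximação simples)
--     atomic_formula = {
--         'A': 'C3H5N1O1', 'R': 'C6H12N4O1', 'N': 'C4H6N2O2', 'D': 'C4H5N1O3',
--         'C': 'C3H5N1O1S1', 'Q': 'C5H8N2O2', 'E': 'C5H7N1O3', 'G': 'C2H3N1O1',
--         'H': 'C6H7N3O1', 'I': 'C6H11N1O1', 'L': 'C6H11N1O1', 'K': 'C6H12N2O1',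
--         'M': 'C5H9N1O1S1', 'F': 'C9H9N1O1', 'P': 'C5H7N1O1', 'S': 'C3H5N1O2',
--         'T': 'C4H7N1O2', 'W': 'C11H10N2O1', 'Y': 'C9H9N1O2', 'V': 'C5H9N1O1'
--     }
--     atoms = Counter()
--     for aa in seq:
--         if aa in atomic_formula:
--             f = atomic_formula[aa]
--             for el in ['C','H','N','O','S']:
--                 if el in f:
--                     i = f.index(el) + 1
--                     num = ''
--                     while i < len(f) and f[i].isdigit():
--                         num += f[i]
--                         i += 1
--                     atoms[el] += int(num) if num else 1
--     formula_str = ''.join(f"{el}{atoms[el]}" for el in ['C','H','N','O','S'] if atoms[el] > 0)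
--     return atoms, formula_str, sum(atoms.values())
-- ===== SOURCE B (Python) =====
-- from collections import Counter
--
-- # B: table of element counts per residue + frequency multiplication (no string parsing).
-- _AA_TABLE = {
--     'A': (3, 5, 1, 1, 0),  'R': (6, 12, 4, 1, 0), 'N': (4, 6, 2, 2, 0),  'D': (4, 5, 1, 3, 0),
--     'C': (3, 5, 1, 1, 1),  'Q': (5, 8, 2, 2, 0),  'E': (5, 7, 1, 3, 0),  'G': (2, 3, 1, 1, 0),
--     'H': (6, 7, 3, 1, 0),  'I': (6, 11, 1, 1, 0), 'L': (6, 11, 1, 1, 0), 'K': (6, 12, 2, 1, 0),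
--     'M': (5, 9, 1, 1, 1),  'F': (9, 9, 1, 1, 0),  'P': (5, 7, 1, 1, 0),  'S': (3, 5, 1, 2, 0),
--     'T': (4, 7, 1, 2, 0),  'W': (11, 10, 2, 1, 0),'Y': (9, 9, 1, 2, 0),  'V': (5, 9, 1, 1, 0),
-- }
--
-- def calc_atomic_composition(seq):
--     atoms = Counter()
--     for aa, n in Counter(seq).items():
--         t = _AA_TABLE.get(aa)
--         if t is None:
--             continue
--         for el, cnt in zip('CHNOS', t):
--             if cnt:
--                 atoms[el] += cnt * n
--     formula_str = ''.join(f"{el}{atoms[el]}" for el in 'CHNOS' if atoms[el] > 0)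
--     return atoms, formula_str, sum(atoms.values())
-- ===== Notes on version B (the rewrite author's own statement) =====
-- stated objective: simpler
-- what changed: B replaces A's per-character parsing of hardcoded formula strings (substring search plus digit-scanning while-loop for each of the 5 elements of every residue occurrence) by a hardcoded residue-to-element-count table combined with a single Counter(seq) frequency pass, adding count*n per element.
import Mathlib
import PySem

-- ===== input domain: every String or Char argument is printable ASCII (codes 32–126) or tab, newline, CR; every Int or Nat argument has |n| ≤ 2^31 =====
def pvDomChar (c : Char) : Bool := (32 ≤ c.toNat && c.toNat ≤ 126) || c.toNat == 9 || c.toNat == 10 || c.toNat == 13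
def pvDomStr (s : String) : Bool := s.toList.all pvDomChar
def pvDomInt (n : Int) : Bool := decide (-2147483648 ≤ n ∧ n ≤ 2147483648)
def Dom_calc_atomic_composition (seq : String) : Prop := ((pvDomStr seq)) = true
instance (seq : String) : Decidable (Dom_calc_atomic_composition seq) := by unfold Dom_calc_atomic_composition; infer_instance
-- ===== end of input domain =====

-- B replaces A's per-character formula-string parsing by a hardcoded element-count table
-- multiplied by character frequencies from Counter(seq) (objective: simpler decomposition).


-- ===== PORT A =====
-- the literal dict atomic_formula (keys are the single-char amino-acid codes)
def pvAtomicFormula : PySem.Dict Char String := PySem.Dict.mk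
  [('A', "C3H5N1O1"), ('R', "C6H12N4O1"), ('N', "C4H6N2O2"), ('D', "C4H5N1O3"),
   ('C', "C3H5N1O1S1"), ('Q', "C5H8N2O2"), ('E', "C5H7N1O3"), ('G', "C2H3N1O1"),
   ('H', "C6H7N3O1"), ('I', "C6H11N1O1"), ('L', "C6H11N1O1"), ('K', "C6H12N2O1"),
   ('M', "C5H9N1O1S1"), ('F', "C9H9N1O1"), ('P', "C5H7N1O1"), ('S', "C3H5N1O2"),
   ('T', "C4H7N1O2"), ('W', "C11H10N2O1"), ('Y', "C9H9N1O2"), ('V', "C5H9N1O1")]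

-- the inner  'i = f.index(el)+1; num = ""; while i < len(f) and f[i].isdigit(): num += f[i]; i += 1'
-- (f.index = PySem.Str.find since the branch is guarded by 'el in f'; the while-loop collecting
--  consecutive digit chars from index i IS takeWhile isdigit on the suffix f[i:])
def pvParseEl (f : String) (d : PySem.Dict String Int) (el : String) : PySem.Dict String Int :=
  if PySem.Str.isIn el f then
    let i : Int := PySem.Str.find f el + 1
    let num : List Char := (f.toList.drop i.toNat).takeWhile PySem.Chars.isdigit
    d.insert el (d.getD el 0 + (if num = [] then 1 else (PySem.Int.ofChars? num).getD 0))
  else d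

-- the body of 'for aa in seq: if aa in atomic_formula: …'
def pvStepA (d : PySem.Dict String Int) (aa : Char) : PySem.Dict String Int :=
  match pvAtomicFormula.get? aa with
  | some f => ["C", "H", "N", "O", "S"].foldl (pvParseEl f) d
  | none => d

def calc_atomic_composition (seq : String) : (List (String × Int)) × String × Int :=
  let atoms := seq.toList.foldl pvStepA PySem.Dict.empty
  let formula_str := PySem.Str.join ""
    (((["C", "H", "N", "O", "S"]).filter (fun el => atoms.getD el 0 > 0)).map
      (fun el => String.ofList (el.toList ++ PySem.Int.toChars (atoms.getD el 0))))
  (atoms.items, formula_str, atoms.values.sum)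

-- ===== PORT B =====
-- B's hardcoded table: amino acid ↦ (C, H, N, O, S) counts
def pvTable : PySem.Dict Char (Int × Int × Int × Int × Int) := PySem.Dict.mk
  [('A', (3, 5, 1, 1, 0)),  ('R', (6, 12, 4, 1, 0)), ('N', (4, 6, 2, 2, 0)),  ('D', (4, 5, 1, 3, 0)),
   ('C', (3, 5, 1, 1, 1)),  ('Q', (5, 8, 2, 2, 0)),  ('E', (5, 7, 1, 3, 0)),  ('G', (2, 3, 1, 1, 0)),
   ('H', (6, 7, 3, 1, 0)),  ('I', (6, 11, 1, 1, 0)), ('L', (6, 11, 1, 1, 0)), ('K', (6, 12, 2, 1, 0)),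
   ('M', (5, 9, 1, 1, 1)),  ('F', (9, 9, 1, 1, 0)),  ('P', (5, 7, 1, 1, 0)),  ('S', (3, 5, 1, 2, 0)),
   ('T', (4, 7, 1, 2, 0)),  ('W', (11, 10, 2, 1, 0)),('Y', (9, 9, 1, 2, 0)),  ('V', (5, 9, 1, 1, 0))]

-- the body of 'for aa, n in Counter(seq).items(): t = table.get(aa); … for el, cnt in zip("CHNOS", t): if cnt: …'
def pvStepB (d : PySem.Dict String Int) (p : Char × Int) : PySem.Dict String Int :=
  match pvTable.get? p.1 with
  | none => d
  | some t =>
    (("CHNOS".toList.zip [t.1, t.2.1, t.2.2.1, t.2.2.2.1, t.2.2.2.2]).foldl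
      (fun d ec =>
        if ec.2 ≠ 0 then
          d.insert (String.ofList [ec.1]) (d.getD (String.ofList [ec.1]) 0 + ec.2 * p.2)
        else d) d)

def calc_atomic_composition_alt (seq : String) : (List (String × Int)) × String × Int :=
  let atoms := (PySem.Dict.counter seq.toList).items.foldl pvStepB PySem.Dict.empty
  let formula_str := PySem.Str.join ""
    ((("CHNOS".toList).filter (fun c => atoms.getD (String.ofList [c]) 0 > 0)).map
      (fun c => String.ofList ([c] ++ PySem.Int.toChars (atoms.getD (String.ofList [c]) 0))))
  (atoms.items, formula_str, atoms.values.sum)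

-- ===== PRECONDITION & SPEC =====
def Spec_calc_atomic_composition (seq : String) (out : (List (String × Int)) × String × Int) : Prop := out = calc_atomic_composition_alt seq
instance (seq : String) (out : (List (String × Int)) × String × Int) : Decidable (Spec_calc_atomic_composition seq out) := by unfold Spec_calc_atomic_composition; infer_instance

-- ===== CLAIM (what is proved, stated in full; the proofs are below) =====
def Claim_equal_calc_atomic_composition : Prop := ∀ (seq : String), Dom_calc_atomic_composition seq → Spec_calc_atomic_composition seq (calc_atomic_composition seq)

-- ===== LEMMAS AND PROOFS =====

-- per-character element counts, read off B's table
def pvC (a : Char) : Int := ((pvTable.get? a).map (·.1)).getD 0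
def pvH (a : Char) : Int := ((pvTable.get? a).map (·.2.1)).getD 0
def pvN (a : Char) : Int := ((pvTable.get? a).map (·.2.2.1)).getD 0
def pvO (a : Char) : Int := ((pvTable.get? a).map (·.2.2.2.1)).getD 0
def pvS (a : Char) : Int := ((pvTable.get? a).map (·.2.2.2.2)).getD 0
def pvValid (a : Char) : Bool := (pvTable.get? a).isSome
def pvSM (a : Char) : Bool := pvS a ≠ 0

-- the only shape the atoms dict ever takes: C,H,N,O in order (if any residue seen), then S (if C/M seen)
def pvShape (hv hs : Bool) (c h n o s : Int) : PySem.Dict String Int :=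
  PySem.Dict.mk ((if hv then [("C", c), ("H", h), ("N", n), ("O", o)] else []) ++
                 (if hs then [("S", s)] else []))

-- the four (resp. five) 'atoms[el] += …' updates both step functions reduce to
def pvUpd4 (d : PySem.Dict String Int) (dc dh dn dd : Int) : PySem.Dict String Int :=
  let d1 := d.insert "C" (d.getD "C" 0 + dc)
  let d2 := d1.insert "H" (d1.getD "H" 0 + dh)
  let d3 := d2.insert "N" (d2.getD "N" 0 + dn)
  d3.insert "O" (d3.getD "O" 0 + dd)

def pvUpd5 (d : PySem.Dict String Int) (dc dh dn dd ds : Int) : PySem.Dict String Int :=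
  (pvUpd4 d dc dh dn dd).insert "S" ((pvUpd4 d dc dh dn dd).getD "S" 0 + ds)

theorem pvUpd4_shape (hv hs : Bool) (c h n o s dc dh dn dd : Int)
    (hhs : hs = true → hv = true)
    (hz : hv = false → c = 0 ∧ h = 0 ∧ n = 0 ∧ o = 0) :
    pvUpd4 (pvShape hv hs c h n o s) dc dh dn dd =
      pvShape true hs (c + dc) (h + dh) (n + dn) (o + dd) s := by
  cases hv <;> cases hs
  · obtain ⟨rfl, rfl, rfl, rfl⟩ := hz rfl
    simp [pvUpd4, pvShape, PySem.Dict.insert, PySem.Dict.getD, PySem.Dict.get?]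
  · exact absurd (hhs rfl) (by simp)
  · simp [pvUpd4, pvShape, PySem.Dict.insert, PySem.Dict.getD, PySem.Dict.get?]
  · simp [pvUpd4, pvShape, PySem.Dict.insert, PySem.Dict.getD, PySem.Dict.get?]

theorem pvUpd5_shape (hv hs : Bool) (c h n o s dc dh dn dd ds : Int)
    (hhs : hs = true → hv = true)
    (hz : hv = false → c = 0 ∧ h = 0 ∧ n = 0 ∧ o = 0) (hz2 : hs = false → s = 0) :
    pvUpd5 (pvShape hv hs c h n o s) dc dh dn dd ds =
      pvShape true true (c + dc) (h + dh) (n + dn) (o + dd) (s + ds) := by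
  cases hv <;> cases hs
  · obtain ⟨rfl, rfl, rfl, rfl⟩ := hz rfl
    obtain rfl := hz2 rfl
    simp [pvUpd5, pvUpd4, pvShape, PySem.Dict.insert, PySem.Dict.getD, PySem.Dict.get?]
  · exact absurd (hhs rfl) (by simp)
  · obtain rfl := hz2 rfl
    simp [pvUpd5, pvUpd4, pvShape, PySem.Dict.insert, PySem.Dict.getD, PySem.Dict.get?]
  · simp [pvUpd5, pvUpd4, pvShape, PySem.Dict.insert, PySem.Dict.getD, PySem.Dict.get?]

set_option maxHeartbeats 4000000 in
theorem pvStepA_shape (a : Char) (hv hs : Bool) (c h n o s : Int)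
    (hhs : hs = true → hv = true)
    (hz : hv = false → c = 0 ∧ h = 0 ∧ n = 0 ∧ o = 0) (hz2 : hs = false → s = 0) :
    pvStepA (pvShape hv hs c h n o s) a =
      pvShape (hv || pvValid a) (hs || pvSM a) (c + pvC a) (h + pvH a) (n + pvN a) (o + pvO a) (s + pvS a) := by
  by_cases hA : a = 'A'
  · subst hA
    simp only [show pvValid 'A' = true from rfl, show pvSM 'A' = false from rfl,
      show pvC 'A' = 3 from rfl, show pvH 'A' = 5 from rfl, show pvN 'A' = 1 from rfl, show pvO 'A' = 1 from rfl, show pvS 'A' = 0 from rfl, Bool.or_true, Bool.or_false, add_zero]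
    rw [show pvStepA (pvShape hv hs c h n o s) 'A' = pvUpd4 (pvShape hv hs c h n o s) 3 5 1 1 from rfl]
    exact pvUpd4_shape hv hs c h n o s 3 5 1 1 hhs hz
  by_cases hR : a = 'R'
  · subst hR
    simp only [show pvValid 'R' = true from rfl, show pvSM 'R' = false from rfl,
      show pvC 'R' = 6 from rfl, show pvH 'R' = 12 from rfl, show pvN 'R' = 4 from rfl, show pvO 'R' = 1 from rfl, show pvS 'R' = 0 from rfl, Bool.or_true, Bool.or_false, add_zero]
    rw [show pvStepA (pvShape hv hs c h n o s) 'R' = pvUpd4 (pvShape hv hs c h n o s) 6 12 4 1 from rfl]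
    exact pvUpd4_shape hv hs c h n o s 6 12 4 1 hhs hz
  by_cases hN : a = 'N'
  · subst hN
    simp only [show pvValid 'N' = true from rfl, show pvSM 'N' = false from rfl,
      show pvC 'N' = 4 from rfl, show pvH 'N' = 6 from rfl, show pvN 'N' = 2 from rfl, show pvO 'N' = 2 from rfl, show pvS 'N' = 0 from rfl, Bool.or_true, Bool.or_false, add_zero]
    rw [show pvStepA (pvShape hv hs c h n o s) 'N' = pvUpd4 (pvShape hv hs c h n o s) 4 6 2 2 from rfl]
    exact pvUpd4_shape hv hs c h n o s 4 6 2 2 hhs hz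
  by_cases hD : a = 'D'
  · subst hD
    simp only [show pvValid 'D' = true from rfl, show pvSM 'D' = false from rfl,
      show pvC 'D' = 4 from rfl, show pvH 'D' = 5 from rfl, show pvN 'D' = 1 from rfl, show pvO 'D' = 3 from rfl, show pvS 'D' = 0 from rfl, Bool.or_true, Bool.or_false, add_zero]
    rw [show pvStepA (pvShape hv hs c h n o s) 'D' = pvUpd4 (pvShape hv hs c h n o s) 4 5 1 3 from rfl]
    exact pvUpd4_shape hv hs c h n o s 4 5 1 3 hhs hz
  by_cases hC : a = 'C'
  · subst hC
    simp only [show pvValid 'C' = true from rfl, show pvSM 'C' = true from rfl,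
      show pvC 'C' = 3 from rfl, show pvH 'C' = 5 from rfl, show pvN 'C' = 1 from rfl, show pvO 'C' = 1 from rfl, show pvS 'C' = 1 from rfl, Bool.or_true, Bool.or_false, add_zero]
    rw [show pvStepA (pvShape hv hs c h n o s) 'C' = pvUpd5 (pvShape hv hs c h n o s) 3 5 1 1 1 from rfl]
    exact pvUpd5_shape hv hs c h n o s 3 5 1 1 1 hhs hz hz2
  by_cases hQ : a = 'Q'
  · subst hQ
    simp only [show pvValid 'Q' = true from rfl, show pvSM 'Q' = false from rfl,
      show pvC 'Q' = 5 from rfl, show pvH 'Q' = 8 from rfl, show pvN 'Q' = 2 from rfl, show pvO 'Q' = 2 from rfl, show pvS 'Q' = 0 from rfl, Bool.or_true, Bool.or_false, add_zero]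
    rw [show pvStepA (pvShape hv hs c h n o s) 'Q' = pvUpd4 (pvShape hv hs c h n o s) 5 8 2 2 from rfl]
    exact pvUpd4_shape hv hs c h n o s 5 8 2 2 hhs hz
  by_cases hE : a = 'E'
  · subst hE
    simp only [show pvValid 'E' = true from rfl, show pvSM 'E' = false from rfl,
      show pvC 'E' = 5 from rfl, show pvH 'E' = 7 from rfl, show pvN 'E' = 1 from rfl, show pvO 'E' = 3 from rfl, show pvS 'E' = 0 from rfl, Bool.or_true, Bool.or_false, add_zero]
    rw [show pvStepA (pvShape hv hs c h n o s) 'E' = pvUpd4 (pvShape hv hs c h n o s) 5 7 1 3 from rfl]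
    exact pvUpd4_shape hv hs c h n o s 5 7 1 3 hhs hz
  by_cases hG : a = 'G'
  · subst hG
    simp only [show pvValid 'G' = true from rfl, show pvSM 'G' = false from rfl,
      show pvC 'G' = 2 from rfl, show pvH 'G' = 3 from rfl, show pvN 'G' = 1 from rfl, show pvO 'G' = 1 from rfl, show pvS 'G' = 0 from rfl, Bool.or_true, Bool.or_false, add_zero]
    rw [show pvStepA (pvShape hv hs c h n o s) 'G' = pvUpd4 (pvShape hv hs c h n o s) 2 3 1 1 from rfl]
    exact pvUpd4_shape hv hs c h n o s 2 3 1 1 hhs hz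
  by_cases hH : a = 'H'
  · subst hH
    simp only [show pvValid 'H' = true from rfl, show pvSM 'H' = false from rfl,
      show pvC 'H' = 6 from rfl, show pvH 'H' = 7 from rfl, show pvN 'H' = 3 from rfl, show pvO 'H' = 1 from rfl, show pvS 'H' = 0 from rfl, Bool.or_true, Bool.or_false, add_zero]
    rw [show pvStepA (pvShape hv hs c h n o s) 'H' = pvUpd4 (pvShape hv hs c h n o s) 6 7 3 1 from rfl]
    exact pvUpd4_shape hv hs c h n o s 6 7 3 1 hhs hz
  by_cases hI : a = 'I'
  · subst hI
    simp only [show pvValid 'I' = true from rfl, show pvSM 'I' = false from rfl,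
      show pvC 'I' = 6 from rfl, show pvH 'I' = 11 from rfl, show pvN 'I' = 1 from rfl, show pvO 'I' = 1 from rfl, show pvS 'I' = 0 from rfl, Bool.or_true, Bool.or_false, add_zero]
    rw [show pvStepA (pvShape hv hs c h n o s) 'I' = pvUpd4 (pvShape hv hs c h n o s) 6 11 1 1 from rfl]
    exact pvUpd4_shape hv hs c h n o s 6 11 1 1 hhs hz
  by_cases hL : a = 'L'
  · subst hL
    simp only [show pvValid 'L' = true from rfl, show pvSM 'L' = false from rfl,
      show pvC 'L' = 6 from rfl, show pvH 'L' = 11 from rfl, show pvN 'L' = 1 from rfl, show pvO 'L' = 1 from rfl, show pvS 'L' = 0 from rfl, Bool.or_true, Bool.or_false, add_zero]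
    rw [show pvStepA (pvShape hv hs c h n o s) 'L' = pvUpd4 (pvShape hv hs c h n o s) 6 11 1 1 from rfl]
    exact pvUpd4_shape hv hs c h n o s 6 11 1 1 hhs hz
  by_cases hK : a = 'K'
  · subst hK
    simp only [show pvValid 'K' = true from rfl, show pvSM 'K' = false from rfl,
      show pvC 'K' = 6 from rfl, show pvH 'K' = 12 from rfl, show pvN 'K' = 2 from rfl, show pvO 'K' = 1 from rfl, show pvS 'K' = 0 from rfl, Bool.or_true, Bool.or_false, add_zero]
    rw [show pvStepA (pvShape hv hs c h n o s) 'K' = pvUpd4 (pvShape hv hs c h n o s) 6 12 2 1 from rfl]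
    exact pvUpd4_shape hv hs c h n o s 6 12 2 1 hhs hz
  by_cases hM : a = 'M'
  · subst hM
    simp only [show pvValid 'M' = true from rfl, show pvSM 'M' = true from rfl,
      show pvC 'M' = 5 from rfl, show pvH 'M' = 9 from rfl, show pvN 'M' = 1 from rfl, show pvO 'M' = 1 from rfl, show pvS 'M' = 1 from rfl, Bool.or_true, Bool.or_false, add_zero]
    rw [show pvStepA (pvShape hv hs c h n o s) 'M' = pvUpd5 (pvShape hv hs c h n o s) 5 9 1 1 1 from rfl]
    exact pvUpd5_shape hv hs c h n o s 5 9 1 1 1 hhs hz hz2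
  by_cases hF : a = 'F'
  · subst hF
    simp only [show pvValid 'F' = true from rfl, show pvSM 'F' = false from rfl,
      show pvC 'F' = 9 from rfl, show pvH 'F' = 9 from rfl, show pvN 'F' = 1 from rfl, show pvO 'F' = 1 from rfl, show pvS 'F' = 0 from rfl, Bool.or_true, Bool.or_false, add_zero]
    rw [show pvStepA (pvShape hv hs c h n o s) 'F' = pvUpd4 (pvShape hv hs c h n o s) 9 9 1 1 from rfl]
    exact pvUpd4_shape hv hs c h n o s 9 9 1 1 hhs hz
  by_cases hP : a = 'P'
  · subst hP
    simp only [show pvValid 'P' = true from rfl, show pvSM 'P' = false from rfl,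
      show pvC 'P' = 5 from rfl, show pvH 'P' = 7 from rfl, show pvN 'P' = 1 from rfl, show pvO 'P' = 1 from rfl, show pvS 'P' = 0 from rfl, Bool.or_true, Bool.or_false, add_zero]
    rw [show pvStepA (pvShape hv hs c h n o s) 'P' = pvUpd4 (pvShape hv hs c h n o s) 5 7 1 1 from rfl]
    exact pvUpd4_shape hv hs c h n o s 5 7 1 1 hhs hz
  by_cases hS : a = 'S'
  · subst hS
    simp only [show pvValid 'S' = true from rfl, show pvSM 'S' = false from rfl,
      show pvC 'S' = 3 from rfl, show pvH 'S' = 5 from rfl, show pvN 'S' = 1 from rfl, show pvO 'S' = 2 from rfl, show pvS 'S' = 0 from rfl, Bool.or_true, Bool.or_false, add_zero]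
    rw [show pvStepA (pvShape hv hs c h n o s) 'S' = pvUpd4 (pvShape hv hs c h n o s) 3 5 1 2 from rfl]
    exact pvUpd4_shape hv hs c h n o s 3 5 1 2 hhs hz
  by_cases hT : a = 'T'
  · subst hT
    simp only [show pvValid 'T' = true from rfl, show pvSM 'T' = false from rfl,
      show pvC 'T' = 4 from rfl, show pvH 'T' = 7 from rfl, show pvN 'T' = 1 from rfl, show pvO 'T' = 2 from rfl, show pvS 'T' = 0 from rfl, Bool.or_true, Bool.or_false, add_zero]
    rw [show pvStepA (pvShape hv hs c h n o s) 'T' = pvUpd4 (pvShape hv hs c h n o s) 4 7 1 2 from rfl]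
    exact pvUpd4_shape hv hs c h n o s 4 7 1 2 hhs hz
  by_cases hW : a = 'W'
  · subst hW
    simp only [show pvValid 'W' = true from rfl, show pvSM 'W' = false from rfl,
      show pvC 'W' = 11 from rfl, show pvH 'W' = 10 from rfl, show pvN 'W' = 2 from rfl, show pvO 'W' = 1 from rfl, show pvS 'W' = 0 from rfl, Bool.or_true, Bool.or_false, add_zero]
    rw [show pvStepA (pvShape hv hs c h n o s) 'W' = pvUpd4 (pvShape hv hs c h n o s) 11 10 2 1 from rfl]
    exact pvUpd4_shape hv hs c h n o s 11 10 2 1 hhs hz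
  by_cases hY : a = 'Y'
  · subst hY
    simp only [show pvValid 'Y' = true from rfl, show pvSM 'Y' = false from rfl,
      show pvC 'Y' = 9 from rfl, show pvH 'Y' = 9 from rfl, show pvN 'Y' = 1 from rfl, show pvO 'Y' = 2 from rfl, show pvS 'Y' = 0 from rfl, Bool.or_true, Bool.or_false, add_zero]
    rw [show pvStepA (pvShape hv hs c h n o s) 'Y' = pvUpd4 (pvShape hv hs c h n o s) 9 9 1 2 from rfl]
    exact pvUpd4_shape hv hs c h n o s 9 9 1 2 hhs hz
  by_cases hV : a = 'V'
  · subst hV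
    simp only [show pvValid 'V' = true from rfl, show pvSM 'V' = false from rfl,
      show pvC 'V' = 5 from rfl, show pvH 'V' = 9 from rfl, show pvN 'V' = 1 from rfl, show pvO 'V' = 1 from rfl, show pvS 'V' = 0 from rfl, Bool.or_true, Bool.or_false, add_zero]
    rw [show pvStepA (pvShape hv hs c h n o s) 'V' = pvUpd4 (pvShape hv hs c h n o s) 5 9 1 1 from rfl]
    exact pvUpd4_shape hv hs c h n o s 5 9 1 1 hhs hz
  have hf : pvAtomicFormula.get? a = none := by
    simp [pvAtomicFormula, PySem.Dict.get?, PySem.Dict.get?_mk_cons, Ne.symm hA, Ne.symm hR, Ne.symm hN, Ne.symm hD, Ne.symm hC, Ne.symm hQ, Ne.symm hE, Ne.symm hG, Ne.symm hH, Ne.symm hI, Ne.symm hL, Ne.symm hK, Ne.symm hM, Ne.symm hF, Ne.symm hP, Ne.symm hS, Ne.symm hT, Ne.symm hW, Ne.symm hY, Ne.symm hV]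
  have hg : pvTable.get? a = none := by
    simp [pvTable, PySem.Dict.get?, PySem.Dict.get?_mk_cons, Ne.symm hA, Ne.symm hR, Ne.symm hN, Ne.symm hD, Ne.symm hC, Ne.symm hQ, Ne.symm hE, Ne.symm hG, Ne.symm hH, Ne.symm hI, Ne.symm hL, Ne.symm hK, Ne.symm hM, Ne.symm hF, Ne.symm hP, Ne.symm hS, Ne.symm hT, Ne.symm hW, Ne.symm hY, Ne.symm hV]
  simp [pvStepA, hf, pvValid, pvSM, pvC, pvH, pvN, pvO, pvS, hg]


set_option maxHeartbeats 4000000 in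
theorem pvStepB_shape (a : Char) (m : Int) (hv hs : Bool) (c h n o s : Int)
    (hhs : hs = true → hv = true)
    (hz : hv = false → c = 0 ∧ h = 0 ∧ n = 0 ∧ o = 0) (hz2 : hs = false → s = 0) :
    pvStepB (pvShape hv hs c h n o s) (a, m) =
      pvShape (hv || pvValid a) (hs || pvSM a) (c + pvC a * m) (h + pvH a * m) (n + pvN a * m) (o + pvO a * m) (s + pvS a * m) := by
  by_cases hA : a = 'A'
  · subst hA
    simp only [show pvValid 'A' = true from rfl, show pvSM 'A' = false from rfl,
      show pvC 'A' = 3 from rfl, show pvH 'A' = 5 from rfl, show pvN 'A' = 1 from rfl, show pvO 'A' = 1 from rfl, show pvS 'A' = 0 from rfl, Bool.or_true, Bool.or_false, zero_mul, add_zero]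
    rw [show pvStepB (pvShape hv hs c h n o s) ('A', m) = pvUpd4 (pvShape hv hs c h n o s) (3 * m) (5 * m) (1 * m) (1 * m) from rfl]
    exact pvUpd4_shape hv hs c h n o s (3 * m) (5 * m) (1 * m) (1 * m) hhs hz
  by_cases hR : a = 'R'
  · subst hR
    simp only [show pvValid 'R' = true from rfl, show pvSM 'R' = false from rfl,
      show pvC 'R' = 6 from rfl, show pvH 'R' = 12 from rfl, show pvN 'R' = 4 from rfl, show pvO 'R' = 1 from rfl, show pvS 'R' = 0 from rfl, Bool.or_true, Bool.or_false, zero_mul, add_zero]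
    rw [show pvStepB (pvShape hv hs c h n o s) ('R', m) = pvUpd4 (pvShape hv hs c h n o s) (6 * m) (12 * m) (4 * m) (1 * m) from rfl]
    exact pvUpd4_shape hv hs c h n o s (6 * m) (12 * m) (4 * m) (1 * m) hhs hz
  by_cases hN : a = 'N'
  · subst hN
    simp only [show pvValid 'N' = true from rfl, show pvSM 'N' = false from rfl,
      show pvC 'N' = 4 from rfl, show pvH 'N' = 6 from rfl, show pvN 'N' = 2 from rfl, show pvO 'N' = 2 from rfl, show pvS 'N' = 0 from rfl, Bool.or_true, Bool.or_false, zero_mul, add_zero]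
    rw [show pvStepB (pvShape hv hs c h n o s) ('N', m) = pvUpd4 (pvShape hv hs c h n o s) (4 * m) (6 * m) (2 * m) (2 * m) from rfl]
    exact pvUpd4_shape hv hs c h n o s (4 * m) (6 * m) (2 * m) (2 * m) hhs hz
  by_cases hD : a = 'D'
  · subst hD
    simp only [show pvValid 'D' = true from rfl, show pvSM 'D' = false from rfl,
      show pvC 'D' = 4 from rfl, show pvH 'D' = 5 from rfl, show pvN 'D' = 1 from rfl, show pvO 'D' = 3 from rfl, show pvS 'D' = 0 from rfl, Bool.or_true, Bool.or_false, zero_mul, add_zero]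
    rw [show pvStepB (pvShape hv hs c h n o s) ('D', m) = pvUpd4 (pvShape hv hs c h n o s) (4 * m) (5 * m) (1 * m) (3 * m) from rfl]
    exact pvUpd4_shape hv hs c h n o s (4 * m) (5 * m) (1 * m) (3 * m) hhs hz
  by_cases hC : a = 'C'
  · subst hC
    simp only [show pvValid 'C' = true from rfl, show pvSM 'C' = true from rfl,
      show pvC 'C' = 3 from rfl, show pvH 'C' = 5 from rfl, show pvN 'C' = 1 from rfl, show pvO 'C' = 1 from rfl, show pvS 'C' = 1 from rfl, Bool.or_true, Bool.or_false]
    rw [show pvStepB (pvShape hv hs c h n o s) ('C', m) = pvUpd5 (pvShape hv hs c h n o s) (3 * m) (5 * m) (1 * m) (1 * m) (1 * m) from rfl]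
    exact pvUpd5_shape hv hs c h n o s (3 * m) (5 * m) (1 * m) (1 * m) (1 * m) hhs hz hz2
  by_cases hQ : a = 'Q'
  · subst hQ
    simp only [show pvValid 'Q' = true from rfl, show pvSM 'Q' = false from rfl,
      show pvC 'Q' = 5 from rfl, show pvH 'Q' = 8 from rfl, show pvN 'Q' = 2 from rfl, show pvO 'Q' = 2 from rfl, show pvS 'Q' = 0 from rfl, Bool.or_true, Bool.or_false, zero_mul, add_zero]
    rw [show pvStepB (pvShape hv hs c h n o s) ('Q', m) = pvUpd4 (pvShape hv hs c h n o s) (5 * m) (8 * m) (2 * m) (2 * m) from rfl]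
    exact pvUpd4_shape hv hs c h n o s (5 * m) (8 * m) (2 * m) (2 * m) hhs hz
  by_cases hE : a = 'E'
  · subst hE
    simp only [show pvValid 'E' = true from rfl, show pvSM 'E' = false from rfl,
      show pvC 'E' = 5 from rfl, show pvH 'E' = 7 from rfl, show pvN 'E' = 1 from rfl, show pvO 'E' = 3 from rfl, show pvS 'E' = 0 from rfl, Bool.or_true, Bool.or_false, zero_mul, add_zero]
    rw [show pvStepB (pvShape hv hs c h n o s) ('E', m) = pvUpd4 (pvShape hv hs c h n o s) (5 * m) (7 * m) (1 * m) (3 * m) from rfl]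
    exact pvUpd4_shape hv hs c h n o s (5 * m) (7 * m) (1 * m) (3 * m) hhs hz
  by_cases hG : a = 'G'
  · subst hG
    simp only [show pvValid 'G' = true from rfl, show pvSM 'G' = false from rfl,
      show pvC 'G' = 2 from rfl, show pvH 'G' = 3 from rfl, show pvN 'G' = 1 from rfl, show pvO 'G' = 1 from rfl, show pvS 'G' = 0 from rfl, Bool.or_true, Bool.or_false, zero_mul, add_zero]
    rw [show pvStepB (pvShape hv hs c h n o s) ('G', m) = pvUpd4 (pvShape hv hs c h n o s) (2 * m) (3 * m) (1 * m) (1 * m) from rfl]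
    exact pvUpd4_shape hv hs c h n o s (2 * m) (3 * m) (1 * m) (1 * m) hhs hz
  by_cases hH : a = 'H'
  · subst hH
    simp only [show pvValid 'H' = true from rfl, show pvSM 'H' = false from rfl,
      show pvC 'H' = 6 from rfl, show pvH 'H' = 7 from rfl, show pvN 'H' = 3 from rfl, show pvO 'H' = 1 from rfl, show pvS 'H' = 0 from rfl, Bool.or_true, Bool.or_false, zero_mul, add_zero]
    rw [show pvStepB (pvShape hv hs c h n o s) ('H', m) = pvUpd4 (pvShape hv hs c h n o s) (6 * m) (7 * m) (3 * m) (1 * m) from rfl]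
    exact pvUpd4_shape hv hs c h n o s (6 * m) (7 * m) (3 * m) (1 * m) hhs hz
  by_cases hI : a = 'I'
  · subst hI
    simp only [show pvValid 'I' = true from rfl, show pvSM 'I' = false from rfl,
      show pvC 'I' = 6 from rfl, show pvH 'I' = 11 from rfl, show pvN 'I' = 1 from rfl, show pvO 'I' = 1 from rfl, show pvS 'I' = 0 from rfl, Bool.or_true, Bool.or_false, zero_mul, add_zero]
    rw [show pvStepB (pvShape hv hs c h n o s) ('I', m) = pvUpd4 (pvShape hv hs c h n o s) (6 * m) (11 * m) (1 * m) (1 * m) from rfl]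
    exact pvUpd4_shape hv hs c h n o s (6 * m) (11 * m) (1 * m) (1 * m) hhs hz
  by_cases hL : a = 'L'
  · subst hL
    simp only [show pvValid 'L' = true from rfl, show pvSM 'L' = false from rfl,
      show pvC 'L' = 6 from rfl, show pvH 'L' = 11 from rfl, show pvN 'L' = 1 from rfl, show pvO 'L' = 1 from rfl, show pvS 'L' = 0 from rfl, Bool.or_true, Bool.or_false, zero_mul, add_zero]
    rw [show pvStepB (pvShape hv hs c h n o s) ('L', m) = pvUpd4 (pvShape hv hs c h n o s) (6 * m) (11 * m) (1 * m) (1 * m) from rfl]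
    exact pvUpd4_shape hv hs c h n o s (6 * m) (11 * m) (1 * m) (1 * m) hhs hz
  by_cases hK : a = 'K'
  · subst hK
    simp only [show pvValid 'K' = true from rfl, show pvSM 'K' = false from rfl,
      show pvC 'K' = 6 from rfl, show pvH 'K' = 12 from rfl, show pvN 'K' = 2 from rfl, show pvO 'K' = 1 from rfl, show pvS 'K' = 0 from rfl, Bool.or_true, Bool.or_false, zero_mul, add_zero]
    rw [show pvStepB (pvShape hv hs c h n o s) ('K', m) = pvUpd4 (pvShape hv hs c h n o s) (6 * m) (12 * m) (2 * m) (1 * m) from rfl]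
    exact pvUpd4_shape hv hs c h n o s (6 * m) (12 * m) (2 * m) (1 * m) hhs hz
  by_cases hM : a = 'M'
  · subst hM
    simp only [show pvValid 'M' = true from rfl, show pvSM 'M' = true from rfl,
      show pvC 'M' = 5 from rfl, show pvH 'M' = 9 from rfl, show pvN 'M' = 1 from rfl, show pvO 'M' = 1 from rfl, show pvS 'M' = 1 from rfl, Bool.or_true, Bool.or_false]
    rw [show pvStepB (pvShape hv hs c h n o s) ('M', m) = pvUpd5 (pvShape hv hs c h n o s) (5 * m) (9 * m) (1 * m) (1 * m) (1 * m) from rfl]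
    exact pvUpd5_shape hv hs c h n o s (5 * m) (9 * m) (1 * m) (1 * m) (1 * m) hhs hz hz2
  by_cases hF : a = 'F'
  · subst hF
    simp only [show pvValid 'F' = true from rfl, show pvSM 'F' = false from rfl,
      show pvC 'F' = 9 from rfl, show pvH 'F' = 9 from rfl, show pvN 'F' = 1 from rfl, show pvO 'F' = 1 from rfl, show pvS 'F' = 0 from rfl, Bool.or_true, Bool.or_false, zero_mul, add_zero]
    rw [show pvStepB (pvShape hv hs c h n o s) ('F', m) = pvUpd4 (pvShape hv hs c h n o s) (9 * m) (9 * m) (1 * m) (1 * m) from rfl]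
    exact pvUpd4_shape hv hs c h n o s (9 * m) (9 * m) (1 * m) (1 * m) hhs hz
  by_cases hP : a = 'P'
  · subst hP
    simp only [show pvValid 'P' = true from rfl, show pvSM 'P' = false from rfl,
      show pvC 'P' = 5 from rfl, show pvH 'P' = 7 from rfl, show pvN 'P' = 1 from rfl, show pvO 'P' = 1 from rfl, show pvS 'P' = 0 from rfl, Bool.or_true, Bool.or_false, zero_mul, add_zero]
    rw [show pvStepB (pvShape hv hs c h n o s) ('P', m) = pvUpd4 (pvShape hv hs c h n o s) (5 * m) (7 * m) (1 * m) (1 * m) from rfl]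
    exact pvUpd4_shape hv hs c h n o s (5 * m) (7 * m) (1 * m) (1 * m) hhs hz
  by_cases hS : a = 'S'
  · subst hS
    simp only [show pvValid 'S' = true from rfl, show pvSM 'S' = false from rfl,
      show pvC 'S' = 3 from rfl, show pvH 'S' = 5 from rfl, show pvN 'S' = 1 from rfl, show pvO 'S' = 2 from rfl, show pvS 'S' = 0 from rfl, Bool.or_true, Bool.or_false, zero_mul, add_zero]
    rw [show pvStepB (pvShape hv hs c h n o s) ('S', m) = pvUpd4 (pvShape hv hs c h n o s) (3 * m) (5 * m) (1 * m) (2 * m) from rfl]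
    exact pvUpd4_shape hv hs c h n o s (3 * m) (5 * m) (1 * m) (2 * m) hhs hz
  by_cases hT : a = 'T'
  · subst hT
    simp only [show pvValid 'T' = true from rfl, show pvSM 'T' = false from rfl,
      show pvC 'T' = 4 from rfl, show pvH 'T' = 7 from rfl, show pvN 'T' = 1 from rfl, show pvO 'T' = 2 from rfl, show pvS 'T' = 0 from rfl, Bool.or_true, Bool.or_false, zero_mul, add_zero]
    rw [show pvStepB (pvShape hv hs c h n o s) ('T', m) = pvUpd4 (pvShape hv hs c h n o s) (4 * m) (7 * m) (1 * m) (2 * m) from rfl]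
    exact pvUpd4_shape hv hs c h n o s (4 * m) (7 * m) (1 * m) (2 * m) hhs hz
  by_cases hW : a = 'W'
  · subst hW
    simp only [show pvValid 'W' = true from rfl, show pvSM 'W' = false from rfl,
      show pvC 'W' = 11 from rfl, show pvH 'W' = 10 from rfl, show pvN 'W' = 2 from rfl, show pvO 'W' = 1 from rfl, show pvS 'W' = 0 from rfl, Bool.or_true, Bool.or_false, zero_mul, add_zero]
    rw [show pvStepB (pvShape hv hs c h n o s) ('W', m) = pvUpd4 (pvShape hv hs c h n o s) (11 * m) (10 * m) (2 * m) (1 * m) from rfl]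
    exact pvUpd4_shape hv hs c h n o s (11 * m) (10 * m) (2 * m) (1 * m) hhs hz
  by_cases hY : a = 'Y'
  · subst hY
    simp only [show pvValid 'Y' = true from rfl, show pvSM 'Y' = false from rfl,
      show pvC 'Y' = 9 from rfl, show pvH 'Y' = 9 from rfl, show pvN 'Y' = 1 from rfl, show pvO 'Y' = 2 from rfl, show pvS 'Y' = 0 from rfl, Bool.or_true, Bool.or_false, zero_mul, add_zero]
    rw [show pvStepB (pvShape hv hs c h n o s) ('Y', m) = pvUpd4 (pvShape hv hs c h n o s) (9 * m) (9 * m) (1 * m) (2 * m) from rfl]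
    exact pvUpd4_shape hv hs c h n o s (9 * m) (9 * m) (1 * m) (2 * m) hhs hz
  by_cases hV : a = 'V'
  · subst hV
    simp only [show pvValid 'V' = true from rfl, show pvSM 'V' = false from rfl,
      show pvC 'V' = 5 from rfl, show pvH 'V' = 9 from rfl, show pvN 'V' = 1 from rfl, show pvO 'V' = 1 from rfl, show pvS 'V' = 0 from rfl, Bool.or_true, Bool.or_false, zero_mul, add_zero]
    rw [show pvStepB (pvShape hv hs c h n o s) ('V', m) = pvUpd4 (pvShape hv hs c h n o s) (5 * m) (9 * m) (1 * m) (1 * m) from rfl]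
    exact pvUpd4_shape hv hs c h n o s (5 * m) (9 * m) (1 * m) (1 * m) hhs hz
  have hf : pvAtomicFormula.get? a = none := by
    simp [pvAtomicFormula, PySem.Dict.get?, PySem.Dict.get?_mk_cons, Ne.symm hA, Ne.symm hR, Ne.symm hN, Ne.symm hD, Ne.symm hC, Ne.symm hQ, Ne.symm hE, Ne.symm hG, Ne.symm hH, Ne.symm hI, Ne.symm hL, Ne.symm hK, Ne.symm hM, Ne.symm hF, Ne.symm hP, Ne.symm hS, Ne.symm hT, Ne.symm hW, Ne.symm hY, Ne.symm hV]
  have hg : pvTable.get? a = none := by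
    simp [pvTable, PySem.Dict.get?, PySem.Dict.get?_mk_cons, Ne.symm hA, Ne.symm hR, Ne.symm hN, Ne.symm hD, Ne.symm hC, Ne.symm hQ, Ne.symm hE, Ne.symm hG, Ne.symm hH, Ne.symm hI, Ne.symm hL, Ne.symm hK, Ne.symm hM, Ne.symm hF, Ne.symm hP, Ne.symm hS, Ne.symm hT, Ne.symm hW, Ne.symm hY, Ne.symm hV]
  simp [pvStepB, hg, hf, pvValid, pvSM, pvC, pvH, pvN, pvO, pvS, hg]


-- pointwise facts read off the table, and their list-level forms used as loop invariants
theorem pvSM_valid (a : Char) : pvSM a = true → pvValid a = true := by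
  unfold pvSM pvS pvValid; cases pvTable.get? a <;> simp

theorem pvValid_zero (a : Char) : pvValid a = false → pvC a = 0 ∧ pvH a = 0 ∧ pvN a = 0 ∧ pvO a = 0 := by
  unfold pvValid pvC pvH pvN pvO; cases pvTable.get? a <;> simp

theorem pvSM_zero (a : Char) : pvSM a = false → pvS a = 0 := by
  unfold pvSM; simp

theorem pvSumZero {α : Type} (f : α → Int) (g : α → Bool) (hfg : ∀ a, g a = false → f a = 0)
    (l : List α) (h : l.any g = false) : (l.map f).sum = 0 := by
  apply List.sum_eq_zero
  intro x hx
  obtain ⟨a, ha, rfl⟩ := List.mem_map.mp hx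
  exact hfg a (by simpa using List.any_eq_false.mp h a ha)

theorem pvAnySM_valid (l : List Char) : l.any pvSM = true → l.any pvValid = true := by
  intro h
  obtain ⟨a, ha, hsm⟩ := List.any_eq_true.mp h
  exact List.any_eq_true.mpr ⟨a, ha, pvSM_valid a hsm⟩

theorem pvAnyValid_zero (l : List Char) (h : l.any pvValid = false) :
    (l.map pvC).sum = 0 ∧ (l.map pvH).sum = 0 ∧ (l.map pvN).sum = 0 ∧ (l.map pvO).sum = 0 :=
  ⟨pvSumZero pvC pvValid (fun a ha => (pvValid_zero a ha).1) l h,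
   pvSumZero pvH pvValid (fun a ha => (pvValid_zero a ha).2.1) l h,
   pvSumZero pvN pvValid (fun a ha => (pvValid_zero a ha).2.2.1) l h,
   pvSumZero pvO pvValid (fun a ha => (pvValid_zero a ha).2.2.2) l h⟩

theorem pvAnySM_zero (l : List Char) (h : l.any pvSM = false) : (l.map pvS).sum = 0 :=
  pvSumZero pvS pvSM pvSM_zero l h

theorem pvAnySM_validP (l : List (Char × Int)) :
    l.any (fun p => pvSM p.1) = true → l.any (fun p => pvValid p.1) = true := by
  intro h
  obtain ⟨a, ha, hsm⟩ := List.any_eq_true.mp h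
  exact List.any_eq_true.mpr ⟨a, ha, pvSM_valid a.1 hsm⟩

theorem pvAnyValid_zeroP (l : List (Char × Int)) (h : l.any (fun p => pvValid p.1) = false) :
    (l.map (fun p => pvC p.1 * p.2)).sum = 0 ∧ (l.map (fun p => pvH p.1 * p.2)).sum = 0 ∧
    (l.map (fun p => pvN p.1 * p.2)).sum = 0 ∧ (l.map (fun p => pvO p.1 * p.2)).sum = 0 :=
  ⟨pvSumZero _ _ (fun a ha => by rw [(pvValid_zero a.1 ha).1, zero_mul]) l h,
   pvSumZero _ _ (fun a ha => by rw [(pvValid_zero a.1 ha).2.1, zero_mul]) l h,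
   pvSumZero _ _ (fun a ha => by rw [(pvValid_zero a.1 ha).2.2.1, zero_mul]) l h,
   pvSumZero _ _ (fun a ha => by rw [(pvValid_zero a.1 ha).2.2.2, zero_mul]) l h⟩

theorem pvAnySM_zeroP (l : List (Char × Int)) (h : l.any (fun p => pvSM p.1) = false) :
    (l.map (fun p => pvS p.1 * p.2)).sum = 0 :=
  pvSumZero _ _ (fun a ha => by rw [pvSM_zero a.1 ha, zero_mul]) l h

theorem pvFoldA_shape (l : List Char) :
    l.foldl pvStepA PySem.Dict.empty =
      pvShape (l.any pvValid) (l.any pvSM)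
        ((l.map pvC).sum) ((l.map pvH).sum) ((l.map pvN).sum) ((l.map pvO).sum) ((l.map pvS).sum) := by
  induction l using List.reverseRecOn with
  | nil => rfl
  | append_singleton l a ih =>
    rw [List.foldl_append, List.foldl_cons, List.foldl_nil, ih,
      pvStepA_shape a _ _ _ _ _ _ _ (pvAnySM_valid l) (pvAnyValid_zero l) (pvAnySM_zero l)]
    simp [List.any_append]

theorem pvFoldB_shape (ps : List (Char × Int)) :
    ps.foldl pvStepB PySem.Dict.empty =
      pvShape (ps.any (fun p => pvValid p.1)) (ps.any (fun p => pvSM p.1))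
        ((ps.map (fun p => pvC p.1 * p.2)).sum) ((ps.map (fun p => pvH p.1 * p.2)).sum)
        ((ps.map (fun p => pvN p.1 * p.2)).sum) ((ps.map (fun p => pvO p.1 * p.2)).sum)
        ((ps.map (fun p => pvS p.1 * p.2)).sum) := by
  induction ps using List.reverseRecOn with
  | nil => rfl
  | append_singleton l p ih =>
    obtain ⟨a, m⟩ := p
    rw [List.foldl_append, List.foldl_cons, List.foldl_nil, ih,
      pvStepB_shape a m _ _ _ _ _ _ _ (pvAnySM_validP l) (pvAnyValid_zeroP l) (pvAnySM_zeroP l)]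
    simp [List.any_append]

-- the grouped sum over Counter items equals the plain sum over the sequence
theorem pvAnyOfList (g : Char → Bool) (l : List Char) : (PySem.Set.ofList l).any g = l.any g := by
  rcases hb : l.any g with _ | _
  · exact List.any_eq_false.mpr fun a ha =>
      List.any_eq_false.mp hb a ((PySem.Set.mem_ofList l a).mp ha)
  · obtain ⟨a, ha, hg⟩ := List.any_eq_true.mp hb
    exact List.any_eq_true.mpr ⟨a, (PySem.Set.mem_ofList l a).mpr ha, hg⟩

theorem pvGroupedSum (f : Char → Int) (l : List Char) :
    ((PySem.Set.ofList l).map (fun k => f k * (l.count k : Int))).sum = (l.map f).sum := by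
  rw [← List.sum_toFinset _ (PySem.Set.nodup_ofList l)]
  have hfs : (PySem.Set.ofList l).toFinset = l.toFinset := by
    ext a
    simp [List.mem_toFinset, PySem.Set.mem_ofList]
  rw [hfs, Finset.sum_list_map_count l f]
  apply Finset.sum_congr rfl
  intro m _
  rw [nsmul_eq_mul, mul_comm]

theorem pvDict_eq (l : List Char) :
    l.foldl pvStepA PySem.Dict.empty = (PySem.Dict.counter l).items.foldl pvStepB PySem.Dict.empty := by
  rw [pvFoldA_shape, PySem.Dict.items_counter, pvFoldB_shape]
  simp only [List.any_map, List.map_map, Function.comp_def]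
  rw [pvAnyOfList pvValid, pvAnyOfList pvSM,
    pvGroupedSum pvC, pvGroupedSum pvH, pvGroupedSum pvN, pvGroupedSum pvO, pvGroupedSum pvS]

-- the two formula-string builders agree on any atoms dict
theorem pvFormula_eq (d : PySem.Dict String Int) :
    PySem.Str.join ""
      (((["C", "H", "N", "O", "S"]).filter (fun el => d.getD el 0 > 0)).map
        (fun el => String.ofList (el.toList ++ PySem.Int.toChars (d.getD el 0)))) =
    PySem.Str.join ""
      ((("CHNOS".toList).filter (fun c => d.getD (String.ofList [c]) 0 > 0)).map
        (fun c => String.ofList ([c] ++ PySem.Int.toChars (d.getD (String.ofList [c]) 0)))) := by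
  have eCons : ∀ (c : Char) (cs : List Char),
      String.ofList (c :: cs) = String.ofList [c] ++ String.ofList cs := fun c cs => by
    rw [show (c :: cs) = [c] ++ cs from rfl, String.ofList_append]
  have eC := fun cs => (eCons 'C' cs).trans rfl
  have eH := fun cs => (eCons 'H' cs).trans rfl
  have eN := fun cs => (eCons 'N' cs).trans rfl
  have eO := fun cs => (eCons 'O' cs).trans rfl
  have eS := fun cs => (eCons 'S' cs).trans rfl
  by_cases h1 : d.getD "C" 0 > 0 <;> by_cases h2 : d.getD "H" 0 > 0 <;>
    by_cases h3 : d.getD "N" 0 > 0 <;> by_cases h4 : d.getD "O" 0 > 0 <;>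
    by_cases h5 : d.getD "S" 0 > 0 <;>
    simp [show "CHNOS".toList = ['C', 'H', 'N', 'O', 'S'] from rfl,
      show (String.ofList ['C'] : String) = "C" from rfl, show (String.ofList ['H'] : String) = "H" from rfl,
      show (String.ofList ['N'] : String) = "N" from rfl, show (String.ofList ['O'] : String) = "O" from rfl,
      show (String.ofList ['S'] : String) = "S" from rfl,
      show "C".toList = ['C'] from rfl, show "H".toList = ['H'] from rfl,
      show "N".toList = ['N'] from rfl, show "O".toList = ['O'] from rfl,
      show "S".toList = ['S'] from rfl,
      List.filter, List.map, h1, h2, h3, h4, h5, eC, eH, eN, eO, eS]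

-- ===== VERDICT (by name: the statement is the Claim_ definition above) =====
theorem calc_atomic_composition_spec : Claim_equal_calc_atomic_composition := by
  intro seq _
  unfold Spec_calc_atomic_composition calc_atomic_composition calc_atomic_composition_alt
  rw [← pvDict_eq seq.toList]
  exact congrArg₂ Prod.mk rfl (congrArg₂ Prod.mk (pvFormula_eq _) rfl)
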